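-- pv_equiv track=rewrite | github.com/suleymanozkeskin/unicode-animations-py | unicode_animations/braille.py | _grid_chunk_to_braille
-- ===== SOURCE A (Python) =====
-- import math
--
-- BRAILLE_DOT_MAP = [
--     [0x01, 0x08],  # row 0
--     [0x02, 0x10],  # row 1
--     [0x04, 0x20],  # row 2
--     [0x40, 0x80],  # row 3
-- ]
--
-- def _grid_chunk_to_braille(chunk: list[list[bool]], cols: int) -> str:
--     """Encode up to 4 grid rows into one braille text line."""
--     char_count = math.ceil(cols / 2)
--     result: list[str] = []
--     for c in range(char_count):
--         code = 0x2800
--         for r in range(min(4, len(chunk))):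
--             row = chunk[r]
--             for d in range(2):
--                 col = c * 2 + d
--                 if col < len(row) and row[col]:
--                     code |= BRAILLE_DOT_MAP[r][d]
--         result.append(chr(code))
--     return "".join(result)
-- ===== SOURCE B (Python) =====
-- def _grid_chunk_to_braille(chunk: list[list[bool]], cols: int) -> str:
--     """Encode up to 4 grid rows into one braille text line.
--
--     Transposes the grid into per-column 4-bit masks (bit r = row r set),
--     then turns each pair of column nibbles into a braille codepoint with a
--     closed bit formula; no dot-map table, no per-character rescan of rows.
--     """
--     char_count = max(0, -(-cols // 2))  # ceil(cols / 2), clamped for the empty case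
--     width = 2 * char_count
--     masks = [0] * width
--     for r, row in enumerate(chunk[:4]):
--         bit = 1 << r
--         for c, v in enumerate(row[:width]):
--             if v:
--                 masks[c] |= bit
--     return "".join(
--         chr(0x2800
--             | (masks[2 * i] & 7) | ((masks[2 * i] & 8) << 3)
--             | ((masks[2 * i + 1] & 7) << 3) | ((masks[2 * i + 1] & 8) << 4))
--         for i in range(char_count)
--     )
-- ===== Notes on version B (the rewrite author's own statement) =====
-- stated objective: faster
-- what changed: A gathers each output character by rescanning up to 4 rows through the BRAILLE_DOT_MAP table; B first transposes the grid into per-column 4-bit masks (bit r = cell in row r set) and then converts each pair of column nibbles into a braille codepoint with a closed bit formula, with no dot-map table and no per-character rescan.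
import Mathlib
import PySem

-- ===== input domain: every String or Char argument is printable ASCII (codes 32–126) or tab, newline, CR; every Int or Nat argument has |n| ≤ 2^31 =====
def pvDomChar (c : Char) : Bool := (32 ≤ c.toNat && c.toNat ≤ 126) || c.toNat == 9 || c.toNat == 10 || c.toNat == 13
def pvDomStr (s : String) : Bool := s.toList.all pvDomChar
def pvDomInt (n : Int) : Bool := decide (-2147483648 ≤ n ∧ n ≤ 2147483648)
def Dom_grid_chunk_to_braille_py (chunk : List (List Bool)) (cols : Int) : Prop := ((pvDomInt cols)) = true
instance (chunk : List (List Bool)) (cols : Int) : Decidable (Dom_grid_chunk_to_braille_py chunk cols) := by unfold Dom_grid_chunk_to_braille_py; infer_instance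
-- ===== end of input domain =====

-- B replaces A's dot-map gather per output character by a transpose into per-column 4-bit
-- masks followed by a closed bit formula turning each nibble pair into a braille codepoint.

-- ===== PORT A =====
-- BRAILLE_DOT_MAP
def pvDotMap : List (List Nat) := [[1, 8], [2, 16], [4, 32], [64, 128]]

-- the body of A's 'for c' loop: compute the code of output char c
def pvACode (chunk : List (List Bool)) (c : Int) : Nat :=
  (PySem.List.pyRange 0 (min 4 (chunk.length : Int)) 1).foldl (fun code r =>
    -- 'row = chunk[r]' is inlined as 'PySem.List.pyGetD chunk r []'
    (PySem.List.pyRange 0 2 1).foldl (fun code d =>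
      let col := c * 2 + d
      if col < ((PySem.List.pyGetD chunk r []).length : Int) ∧ PySem.List.pyGetD (PySem.List.pyGetD chunk r []) col false = true then
        code ||| PySem.List.pyGetD (PySem.List.pyGetD pvDotMap r []) d 0
      else code) code) 0x2800

def grid_chunk_to_braille_py (chunk : List (List Bool)) (cols : Int) : String :=
  -- math.ceil(cols / 2) is exact on |cols| ≤ 2^31 and equals -((-cols) // 2)
  let charCount : Int := -(PySem.Int.floordiv (-cols) 2)
  let result : List Char := (PySem.List.pyRange 0 charCount 1).foldl
    (fun res c => res ++ [Char.ofNat (pvACode chunk c)]) []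
  String.mk result

-- ===== PORT B =====
-- B's inner loop: 'for c, v in enumerate(row)'; scatter bit into masks at each set cell
def pvFillRow (bit : Nat) (ms : List Nat) (rowt : List Bool) : List Nat :=
  rowt.zipIdx.foldl (fun ms q => if q.1 then ms.modify q.2 (fun x => x ||| bit) else ms) ms

def grid_chunk_to_braille_py_alt (chunk : List (List Bool)) (cols : Int) : String :=
  -- char_count = max(0, -(-cols // 2))
  let charCount : Int := max 0 (-(PySem.Int.floordiv (-cols) 2))
  -- width = 2 * char_count (a nonnegative int, so toNat is exact)
  let width : Nat := (2 * charCount).toNat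
  -- masks = [0] * width, then 'for r, row in enumerate(chunk[:4])' ('[:4]'/'[:width]' = take)
  let ms := ((chunk.take 4).zipIdx).foldl
    (fun ms p => pvFillRow (1 <<< p.2) ms (p.1.take width)) (List.replicate width 0)
  -- masks[2*i] is always in range for i < char_count, so pyGetD's default is never used
  String.mk ((PySem.List.pyRange 0 charCount 1).map (fun i =>
    Char.ofNat (0x2800
      ||| (PySem.List.pyGetD ms (2*i) 0 &&& 7) ||| ((PySem.List.pyGetD ms (2*i) 0 &&& 8) <<< 3)
      ||| ((PySem.List.pyGetD ms (2*i+1) 0 &&& 7) <<< 3) ||| ((PySem.List.pyGetD ms (2*i+1) 0 &&& 8) <<< 4))))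

-- ===== PRECONDITION & SPEC =====
def Spec_grid_chunk_to_braille_py (chunk : List (List Bool)) (cols : Int) (out : String) : Prop := out = grid_chunk_to_braille_py_alt chunk cols
instance (chunk : List (List Bool)) (cols : Int) (out : String) : Decidable (Spec_grid_chunk_to_braille_py chunk cols out) := by unfold Spec_grid_chunk_to_braille_py; infer_instance

-- ===== CLAIM (what is proved, stated in full; the proofs are below) =====
def Claim_equal_grid_chunk_to_braille_py : Prop := ∀ (chunk : List (List Bool)) (cols : Int), Dom_grid_chunk_to_braille_py chunk cols → Spec_grid_chunk_to_braille_py chunk cols (grid_chunk_to_braille_py chunk cols)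

-- ===== LEMMAS AND PROOFS =====

-- the bit A's dot map contributes at (r, d): BRAILLE_DOT_MAP[r][d]
def pvM (r : Int) (d : Nat) : Nat :=
  PySem.List.pyGetD (PySem.List.pyGetD pvDotMap r []) (d : Int) 0

-- a running OR fold starts from 0
lemma pv_or_shift {α : Type} (g : α → Nat) (rs : List α) (a : Nat) :
    rs.foldl (fun acc r => acc ||| g r) a = a ||| rs.foldl (fun acc r => acc ||| g r) 0 := by
  induction rs generalizing a with
  | nil => simp
  | cons r t ih =>
    simp only [List.foldl_cons]
    rw [ih (a ||| g r), ih (0 ||| g r)]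
    simp [Nat.or_assoc]

-- A's code for char i, as 0x2800 OR the per-row gathered bits
lemma pv_acode (chunk : List (List Bool)) (i : Nat) :
    pvACode chunk (i : Int) = 0x2800 |||
      (PySem.List.pyRange 0 (min 4 (chunk.length : Int)) 1).foldl
        (fun acc r =>
          acc |||
            ((if (PySem.List.pyGetD chunk r []).getD (2 * i) false = true then pvM r 0 else 0) |||
             (if (PySem.List.pyGetD chunk r []).getD (2 * i + 1) false = true then pvM r 1 else 0))) 0 := by
  unfold pvACode
  rw [show PySem.List.pyRange 0 2 1 = [0, 1] by decide]
  rw [PySem.List.foldl_congr_mem (g := fun code r =>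
    code |||
      ((if (PySem.List.pyGetD chunk r []).getD (2 * i) false = true then pvM r 0 else 0) |||
       (if (PySem.List.pyGetD chunk r []).getD (2 * i + 1) false = true then pvM r 1 else 0)))]
  · exact pv_or_shift _ _ _
  · intro code r _
    simp only [List.foldl_cons, List.foldl_nil]
    set row := PySem.List.pyGetD chunk r [] with hrow
    clear hrow
    rw [show ((i : Int) * 2 + 0) = ((2 * i : Nat) : Int) by push_cast; ring,
        show ((i : Int) * 2 + 1) = ((2 * i + 1 : Nat) : Int) by push_cast; ring,
        PySem.List.pyGetD_natCast, PySem.List.pyGetD_natCast]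
    have key : ∀ d : Nat, (((d : Nat) : Int) < (row.length : Int) ∧ row.getD d false = true) ↔
        (row.getD d false = true) := by
      intro d
      constructor
      · exact And.right
      · intro h
        refine ⟨?_, h⟩
        by_cases hlt : d < row.length
        · exact_mod_cast hlt
        · rw [List.getD_eq_default _ _ (by omega)] at h; cases h
    rw [if_congr (key (2 * i)) rfl rfl, if_congr (key (2 * i + 1)) rfl rfl]
    by_cases h0 : row[2 * i]?.getD false = true <;>
      by_cases h1 : row[2 * i + 1]?.getD false = true <;>
        simp [List.getD_eq_getElem?_getD, h0, h1, pvM, Nat.or_assoc]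

-- the column nibble B's transpose builds: bit (1 <<< r) for each row whose cell c is set
def pvNib : List (List Bool) → Nat → Nat → Nat
  | [], _, _ => 0
  | row :: t, r, c => (if row.getD c false then 1 <<< r else 0) ||| pvNib t (r + 1) c

-- B's inner scatter over one row, pointwise
lemma pv_fill_row (row : List Bool) (bit : Nat) (s : Nat) (ms : List Nat) (c : Nat) :
    ((row.zipIdx s).foldl (fun ms q => if q.1 then ms.modify q.2 (fun x => x ||| bit) else ms) ms)[c]?
      = ms[c]?.map (fun x => x ||| if s ≤ c ∧ row.getD (c - s) false = true then bit else 0) := by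
  induction row generalizing s ms with
  | nil =>
    cases h : ms[c]? <;> simp [h]
  | cons v t ih =>
    rw [List.zipIdx_cons, List.foldl_cons]
    have hcond : c ≠ s → ((s ≤ c ∧ (v :: t).getD (c - s) false = true)
        ↔ (s + 1 ≤ c ∧ t.getD (c - (s + 1)) false = true)) := by
      intro hne
      rcases Nat.lt_trichotomy c s with h | h | h
      · constructor <;> rintro ⟨h1, h2⟩ <;> exact absurd h1 (by omega)
      · exact absurd h hne
      · have he : c - s = (c - (s + 1)) + 1 := by omega
        rw [he, List.getD_cons_succ]
        constructor <;> rintro ⟨h1, h2⟩ <;> exact ⟨by omega, h2⟩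
    cases v with
    | false =>
      simp only [show ((false, s).1 = true) = False by simp, if_neg (fun h => h)]
      rw [ih]
      congr 1
      funext x
      congr 1
      by_cases hne : c = s
      · subst hne
        have h1 : ¬ (c + 1 ≤ c) := by omega
        simp [h1]
      · rw [if_congr (hcond hne) rfl rfl]
    | true =>
      simp only [if_pos trivial]
      rw [ih, List.getElem?_modify]
      simp only [Option.map_eq_map, Option.map_map]
      congr 1
      funext x
      simp only [Function.comp_apply]
      by_cases hne : s = c
      · subst hne
        have h1 : ¬ (s + 1 ≤ s) := by omega
        simp [h1]
      · rw [if_neg hne, if_congr (hcond (fun h => hne h.symm)).symm rfl rfl]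

-- B's whole transpose phase, pointwise
lemma pv_fill (w : Nat) (rows : List (List Bool)) (r0 : Nat) (ms : List Nat) (c : Nat) :
    ((rows.zipIdx r0).foldl (fun ms p => pvFillRow (1 <<< p.2) ms (p.1.take w)) ms)[c]?
      = ms[c]?.map (fun x => x ||| pvNib (rows.map (fun r => r.take w)) r0 c) := by
  induction rows generalizing r0 ms with
  | nil => cases h : ms[c]? <;> simp [h, pvNib]
  | cons row t ih =>
    rw [List.zipIdx_cons, List.foldl_cons, ih]
    show _ = ms[c]?.map (fun x => x ||| pvNib (row.take w :: t.map (fun r => r.take w)) r0 c)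
    rw [show pvFillRow (1 <<< r0) ms (row.take w)
        = ((row.take w).zipIdx 0).foldl (fun ms q => if q.1 then ms.modify q.2 (fun x => x ||| (1 <<< r0)) else ms) ms from rfl]
    rw [pv_fill_row]
    cases h : ms[c]? with
    | none => simp
    | some x =>
      simp only [Option.map_some, Option.some.injEq, pvNib]
      have : (0 ≤ c ∧ (row.take w).getD (c - 0) false = true) ↔ ((row.take w).getD c false = true) := by
        simp
      rw [if_congr this rfl rfl, Nat.or_assoc]

-- truncating a row to width w does not change a column nibble at c < w
lemma pv_nib_take (rows : List (List Bool)) (r0 c w : Nat) (h : c < w) :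
    pvNib (rows.map (fun r => r.take w)) r0 c = pvNib rows r0 c := by
  induction rows generalizing r0 with
  | nil => rfl
  | cons row t ih =>
    simp only [List.map_cons, pvNib, ih]
    congr 2
    simp [List.getD_eq_getElem?_getD, h]

-- the closed bit formula on the two column nibbles equals A's dot-map gather
lemma pv_code (chunk : List (List Bool)) (k : Nat) :
    pvACode chunk (k : Int) =
      0x2800
        ||| (pvNib (chunk.take 4) 0 (2 * k) &&& 7) ||| ((pvNib (chunk.take 4) 0 (2 * k) &&& 8) <<< 3)
        ||| ((pvNib (chunk.take 4) 0 (2 * k + 1) &&& 7) <<< 3) ||| ((pvNib (chunk.take 4) 0 (2 * k + 1) &&& 8) <<< 4) := by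
  rw [pv_acode]
  match chunk with
  | [] =>
    simp [pvNib]
  | [a] =>
    rw [show min 4 (([a].length : Nat) : Int) = 1 by simp, show PySem.List.pyRange 0 1 1 = [0] by decide]
    simp only [List.foldl_cons, List.foldl_nil, List.take, pvNib,
      show PySem.List.pyGetD [a] (0 : Int) [] = a by simp [PySem.List.pyGetD_ofNat']]
    generalize a.getD (2 * k) false = b0
    generalize a.getD (2 * k + 1) false = b1
    revert b0 b1; decide
  | [a, b] =>
    rw [show min 4 (([a, b].length : Nat) : Int) = 2 by simp, show PySem.List.pyRange 0 2 1 = [0, 1] by decide]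
    simp only [List.foldl_cons, List.foldl_nil, List.take, pvNib,
      show PySem.List.pyGetD [a, b] (0 : Int) [] = a by simp [PySem.List.pyGetD_ofNat'],
      show PySem.List.pyGetD [a, b] (1 : Int) [] = b by simp [PySem.List.pyGetD_ofNat']]
    generalize a.getD (2 * k) false = b0
    generalize a.getD (2 * k + 1) false = b1
    generalize b.getD (2 * k) false = b2
    generalize b.getD (2 * k + 1) false = b3
    revert b0 b1 b2 b3; decide
  | [a, b, c] =>
    rw [show min 4 (([a, b, c].length : Nat) : Int) = 3 by simp, show PySem.List.pyRange 0 3 1 = [0, 1, 2] by decide]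
    simp only [List.foldl_cons, List.foldl_nil, List.take, pvNib,
      show PySem.List.pyGetD [a, b, c] (0 : Int) [] = a by simp [PySem.List.pyGetD_ofNat'],
      show PySem.List.pyGetD [a, b, c] (1 : Int) [] = b by simp [PySem.List.pyGetD_ofNat'],
      show PySem.List.pyGetD [a, b, c] (2 : Int) [] = c by simp [PySem.List.pyGetD_ofNat']]
    generalize a.getD (2 * k) false = b0
    generalize a.getD (2 * k + 1) false = b1
    generalize b.getD (2 * k) false = b2
    generalize b.getD (2 * k + 1) false = b3
    generalize c.getD (2 * k) false = b4
    generalize c.getD (2 * k + 1) false = b5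
    revert b0 b1 b2 b3 b4 b5; decide
  | a :: b :: c :: d :: t =>
    rw [show min 4 (((a :: b :: c :: d :: t).length : Nat) : Int) = 4 by simp; omega,
        show PySem.List.pyRange 0 4 1 = [0, 1, 2, 3] by decide]
    simp only [List.foldl_cons, List.foldl_nil, List.take, pvNib,
      show PySem.List.pyGetD (a :: b :: c :: d :: t) (0 : Int) [] = a by simp [PySem.List.pyGetD_ofNat'],
      show PySem.List.pyGetD (a :: b :: c :: d :: t) (1 : Int) [] = b by simp [PySem.List.pyGetD_ofNat'],
      show PySem.List.pyGetD (a :: b :: c :: d :: t) (2 : Int) [] = c by simp [PySem.List.pyGetD_ofNat'],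
      show PySem.List.pyGetD (a :: b :: c :: d :: t) (3 : Int) [] = d by simp [PySem.List.pyGetD_ofNat']]
    generalize a.getD (2 * k) false = b0
    generalize a.getD (2 * k + 1) false = b1
    generalize b.getD (2 * k) false = b2
    generalize b.getD (2 * k + 1) false = b3
    generalize c.getD (2 * k) false = b4
    generalize c.getD (2 * k + 1) false = b5
    generalize d.getD (2 * k) false = b6
    generalize d.getD (2 * k + 1) false = b7
    revert b0 b1 b2 b3 b4 b5 b6 b7; decide

-- ===== VERDICT (by name: the statement is the Claim_ definition above) =====
theorem grid_chunk_to_braille_py_spec : Claim_equal_grid_chunk_to_braille_py := by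
  intro chunk cols _
  unfold Spec_grid_chunk_to_braille_py grid_chunk_to_braille_py grid_chunk_to_braille_py_alt
  set cc : Int := -(PySem.Int.floordiv (-cols) 2) with hcc
  simp only [PySem.List.foldl_append_singleton_eq_map, List.nil_append]
  congr 1
  have hrange : PySem.List.pyRange 0 cc 1 = PySem.List.pyRange 0 (max 0 cc) 1 := by
    rw [PySem.List.pyRange_one, PySem.List.pyRange_one]
    congr 2
    omega
  rw [hrange, PySem.List.pyRange_one]
  simp only [List.map_map]
  apply List.map_congr_left
  intro j hj
  simp only [List.mem_range] at hj
  simp only [Function.comp]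
  set w : Nat := (2 * max 0 cc).toNat with hw
  have hlt : j < (max 0 cc).toNat := by omega
  have hj2 : 2 * j + 1 < w := by omega
  have hidx : ∀ c : Nat, c < w →
      PySem.List.pyGetD
        (((chunk.take 4).zipIdx).foldl (fun ms p => pvFillRow (1 <<< p.2) ms (p.1.take w)) (List.replicate w 0))
        ((c : Nat) : Int) 0 = pvNib (chunk.take 4) 0 c := by
    intro c hc
    rw [PySem.List.pyGetD_natCast, List.getD_eq_getElem?_getD, pv_fill]
    simp only [List.getElem?_replicate, if_pos hc, Option.map_some, Option.getD_some]
    rw [pv_nib_take _ _ _ _ hc]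
    exact Nat.zero_or _
  have e1 : ((0 : Int) + (j : Nat)) = ((j : Nat) : Int) := by omega
  have e2 : (2 * ((j : Nat) : Int)) = ((2 * j : Nat) : Int) := by push_cast; ring
  have e3 : (((2 * j : Nat) : Int) + 1) = ((2 * j + 1 : Nat) : Int) := by push_cast; ring
  rw [e1, e2, e3, hidx (2 * j) (by omega), hidx (2 * j + 1) hj2, pv_code]
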